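-- pv_equiv track=rewrite | github.com/trabanttrump-source/PyDDLE | PyDDLE v1.0.py | dedent_selection
-- ===== SOURCE A (Python) =====
-- def dedent_selection(code):
--     """Decrease indentation of selected lines"""
--     lines = code.split('\n')
--     dedented_lines = []
--     for line in lines:
--         if line.startswith('    '):
--             dedented_lines.append(line[4:])
--         elif line.startswith('\t'):
--             dedented_lines.append(line[1:])
--         else:
--             dedented_lines.append(line)
--     return '\n'.join(dedented_lines)
-- ===== SOURCE B (Python) =====
-- def _drop_indent(line):
--     i = 4 if line.startswith('    ') else (1 if line.startswith('\t') else 0)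
--     return line[i:]
--
--
-- def dedent_selection(code):
--     """Decrease indentation of selected lines"""
--     pieces = []
--     cur = code
--     while True:
--         rest = _drop_indent(cur)
--         head, sep, tail = rest.partition('\n')
--         if not sep:
--             pieces.append(rest)
--             return ''.join(pieces)
--         pieces.append(head + '\n')
--         cur = tail
-- ===== Notes on version B (the rewrite author's own statement) =====
-- stated objective: alternative
-- what changed: Replaces split-into-lines / per-line list / join with a streaming str.partition loop that dedents and emits one line at a time without ever materialising the list of lines.
import Mathlib
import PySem

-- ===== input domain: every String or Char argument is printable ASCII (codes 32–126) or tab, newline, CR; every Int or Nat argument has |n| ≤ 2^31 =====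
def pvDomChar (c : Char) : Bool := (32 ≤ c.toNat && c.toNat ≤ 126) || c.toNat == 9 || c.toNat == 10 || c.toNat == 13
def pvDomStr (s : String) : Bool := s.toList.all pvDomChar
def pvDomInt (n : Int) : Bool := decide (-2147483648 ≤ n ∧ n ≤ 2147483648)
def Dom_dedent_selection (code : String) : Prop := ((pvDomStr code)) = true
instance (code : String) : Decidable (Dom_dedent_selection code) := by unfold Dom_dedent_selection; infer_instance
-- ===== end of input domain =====

-- B replaces A's split-into-lines / per-line list / join pipeline by a streaming partition
-- loop over newline boundaries (objective: alternative decomposition, same result).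

-- ===== PORT A =====
def dedent_selection (code : String) : String :=
  let lines := PySem.Chars.splitOn code.toList ['\n']
  let dedented_lines := lines.foldl (fun acc line =>
    if PySem.Chars.startswith line [' ', ' ', ' ', ' '] then
      acc ++ [PySem.List.slice line (some 4) none]
    else if PySem.Chars.startswith line ['\t'] then
      acc ++ [PySem.List.slice line (some 1) none]
    else
      acc ++ [line]) []
  String.mk (PySem.Chars.join ['\n'] dedented_lines)

-- ===== PORT B =====
-- hand port of Python's str.partition('\n') (single-character separator): exact —
-- returns (part before the first '\n', some (part after it)), or (s, none) if '\n' is absent.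
def pvPartitionNL : List Char → List Char × Option (List Char)
  | [] => ([], none)
  | c :: rest =>
    if c = '\n' then ([], some rest)
    else
      let r := pvPartitionNL rest
      (c :: r.1, r.2)

-- cited by the decreasing_by of the loop below
theorem pvPartitionNL_some_length (cs h t : List Char)
    (he : pvPartitionNL cs = (h, some t)) : t.length < cs.length := by
  induction cs generalizing h t with
  | nil => simp [pvPartitionNL] at he
  | cons c rest ih =>
    by_cases hc : c = '\n'
    · simp [pvPartitionNL, hc] at he
      obtain ⟨-, he2⟩ := he
      subst he2; simp
    · simp [pvPartitionNL, hc] at he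
      obtain ⟨-, he2⟩ := he
      cases hr : (pvPartitionNL rest).2 with
      | none => rw [hr] at he2; simp at he2
      | some t' =>
        rw [hr] at he2
        have hlt := ih (pvPartitionNL rest).1 t' (by rw [← hr])
        simp only [Option.some.injEq] at he2
        subst he2
        simpa using Nat.lt_succ_of_lt hlt

-- B's _drop_indent
def dedent_selection_altLine (line : List Char) : List Char :=
  let i : Int :=
    if PySem.Chars.startswith line [' ', ' ', ' ', ' '] then 4
    else if PySem.Chars.startswith line ['\t'] then 1 else 0
  PySem.List.slice line (some i) none

theorem dedent_selection_altLine_length_le (line : List Char) :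
    (dedent_selection_altLine line).length ≤ line.length := by
  unfold dedent_selection_altLine
  split_ifs <;> (rw [PySem.List.slice_from _ (by norm_num)]; simp)

-- B's while-loop; `acc` is the flattened `pieces` accumulator (''.join done incrementally)
def dedent_selection_altGo (acc : List Char) (cur : List Char) : List Char :=
  match he : pvPartitionNL (dedent_selection_altLine cur) with
  | (_, none) => acc ++ dedent_selection_altLine cur
  | (head, some tail) => dedent_selection_altGo (acc ++ head ++ ['\n']) tail
termination_by cur.length
decreasing_by
  have h1 := pvPartitionNL_some_length _ _ _ he
  have h2 := dedent_selection_altLine_length_le cur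
  omega

def dedent_selection_alt (code : String) : String :=
  String.mk (dedent_selection_altGo [] code.toList)

-- ===== PRECONDITION & SPEC =====
def Spec_dedent_selection (code : String) (out : String) : Prop := out = dedent_selection_alt code
instance (code : String) (out : String) : Decidable (Spec_dedent_selection code out) := by unfold Spec_dedent_selection; infer_instance

-- ===== CLAIM (what is proved, stated in full; the proofs are below) =====
def Claim_equal_dedent_selection : Prop := ∀ (code : String), Dom_dedent_selection code → Spec_dedent_selection code (dedent_selection code)

-- ===== LEMMAS AND PROOFS =====

-- the common per-line transform, written as A writes it
def pvF (line : List Char) : List Char :=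
  if PySem.Chars.startswith line [' ', ' ', ' ', ' '] then PySem.List.slice line (some 4) none
  else if PySem.Chars.startswith line ['\t'] then PySem.List.slice line (some 1) none
  else line

theorem altLine_eq_pvF (line : List Char) : dedent_selection_altLine line = pvF line := by
  unfold dedent_selection_altLine pvF
  split_ifs with h1 h2
  · rfl
  · rfl
  · rw [PySem.List.slice_from _ (le_refl (0:Int))]
    simp

theorem pvF_eq_drop (line : List Char) : ∃ k, pvF line = line.drop k ∧
    (PySem.Chars.startswith line [' ', ' ', ' ', ' '] → k = 4) := by
  unfold pvF
  split_ifs with h1 h2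
  · exact ⟨4, by rw [PySem.List.slice_from _ (by norm_num)]; simp, fun _ => rfl⟩
  · exact ⟨1, by rw [PySem.List.slice_from _ (by norm_num)]; simp, fun h => absurd h (by simp [h1])⟩
  · exact ⟨0, by simp, fun h => absurd h (by simp [h1])⟩

theorem mem_pvF (line : List Char) {c : Char} (h : c ∈ pvF line) : c ∈ line := by
  obtain ⟨k, hk, -⟩ := pvF_eq_drop line
  rw [hk] at h
  exact List.mem_of_mem_drop h

-- startswith looks only at the first line: appending '\n'::suf after a '\n'-free prefix changes nothing
theorem isPrefixOf_append_cons : ∀ (pat pre suf : List Char), '\n' ∉ pat →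
    pat.isPrefixOf (pre ++ '\n' :: suf) = pat.isPrefixOf pre := by
  intro pat
  induction pat with
  | nil => intro pre suf _; simp [List.isPrefixOf]
  | cons p ps ih =>
    intro pre suf hpat
    have hp : p ≠ '\n' := fun h => hpat (h ▸ List.mem_cons_self)
    cases pre with
    | nil =>
      simp only [List.nil_append, List.isPrefixOf, Bool.and_eq_true, beq_iff_eq]
      simp [hp]
    | cons a pre' =>
      simp only [List.cons_append, List.isPrefixOf]
      rw [ih pre' suf (fun h => hpat (List.mem_cons_of_mem _ h))]

theorem pvF_append_cons (pre suf : List Char) (hpre : '\n' ∉ pre) :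
    pvF (pre ++ '\n' :: suf) = pvF pre ++ '\n' :: suf := by
  unfold pvF
  rw [show PySem.Chars.startswith (pre ++ '\n' :: suf) [' ', ' ', ' ', ' ']
        = PySem.Chars.startswith pre [' ', ' ', ' ', ' '] from
      isPrefixOf_append_cons _ pre suf (by decide),
      show PySem.Chars.startswith (pre ++ '\n' :: suf) ['\t']
        = PySem.Chars.startswith pre ['\t'] from
      isPrefixOf_append_cons _ pre suf (by decide)]
  split_ifs with h1 h2
  · have hlen : 4 ≤ pre.length := by
      have := (List.isPrefixOf_iff_prefix.mp h1).length_le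
      simpa using this
    rw [PySem.List.slice_from _ (by norm_num : (0:Int) ≤ 4),
        PySem.List.slice_from _ (by norm_num : (0:Int) ≤ 4)]
    exact List.drop_append_of_le_length (by simp; omega)
  · have hlen : 1 ≤ pre.length := by
      have := (List.isPrefixOf_iff_prefix.mp h2).length_le
      simpa using this
    rw [PySem.List.slice_from _ (by norm_num : (0:Int) ≤ 1),
        PySem.List.slice_from _ (by norm_num : (0:Int) ≤ 1)]
    exact List.drop_append_of_le_length (by simp; omega)
  · rfl

-- pvPartitionNL characterisations
theorem pvPartitionNL_of_not_mem (cs : List Char) (h : '\n' ∉ cs) :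
    pvPartitionNL cs = (cs, none) := by
  induction cs with
  | nil => rfl
  | cons c rest ih =>
    have hc : c ≠ '\n' := fun hc => h (hc ▸ List.mem_cons_self)
    simp [pvPartitionNL, hc, Ne.symm hc, ih (fun hm => h (List.mem_cons_of_mem _ hm))]

theorem pvPartitionNL_append_cons (pre suf : List Char) (h : '\n' ∉ pre) :
    pvPartitionNL (pre ++ '\n' :: suf) = (pre, some suf) := by
  induction pre with
  | nil => simp [pvPartitionNL]
  | cons c rest ih =>
    have hc : c ≠ '\n' := fun hc => h (hc ▸ List.mem_cons_self)
    simp [pvPartitionNL, hc, Ne.symm hc, ih (fun hm => h (List.mem_cons_of_mem _ hm))]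

-- every string is either '\n'-free or splits at its first '\n'
theorem line_decomp (cs : List Char) :
    '\n' ∉ cs ∨ ∃ pre suf, cs = pre ++ '\n' :: suf ∧ '\n' ∉ pre := by
  induction cs with
  | nil => exact Or.inl (by simp)
  | cons c rest ih =>
    by_cases hc : c = '\n'
    · exact Or.inr ⟨[], rest, by simp [hc], by simp⟩
    · rcases ih with h | ⟨pre, suf, heq, hpre⟩
      · exact Or.inl (by simp [Ne.symm hc, h])
      · exact Or.inr ⟨c :: pre, suf, by simp [heq], by simp [Ne.symm hc, hpre]⟩

-- splitOnP of a '\n'-free string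
theorem splitOnP_of_not_mem (cs : List Char) (h : '\n' ∉ cs) :
    cs.splitOnP (· == '\n') = [cs] := by
  induction cs with
  | nil => simp
  | cons c rest ih =>
    have hc : c ≠ '\n' := fun hc => h (hc ▸ List.mem_cons_self)
    rw [List.splitOnP_cons]
    simp [hc, ih (fun hm => h (List.mem_cons_of_mem _ hm))]

theorem splitOnP_ne_nil' (cs : List Char) : cs.splitOnP (· == '\n') ≠ [] := by
  induction cs with
  | nil => simp
  | cons c rest ih =>
    rw [List.splitOnP_cons]
    split_ifs
    · simp
    · intro h
      exact ih (by cases hres : rest.splitOnP (· == '\n') <;> simp [hres] at h ⊢)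

theorem splitOnP_append_cons (pre suf : List Char) (h : '\n' ∉ pre) :
    (pre ++ '\n' :: suf).splitOnP (· == '\n') = pre :: suf.splitOnP (· == '\n') := by
  induction pre with
  | nil => simp [List.splitOnP_cons]
  | cons c rest ih =>
    have hc : c ≠ '\n' := fun hc => h (hc ▸ List.mem_cons_self)
    rw [List.cons_append, List.splitOnP_cons]
    simp only [hc, beq_iff_eq, if_neg, ite_false]
    rw [ih (fun hm => h (List.mem_cons_of_mem _ hm))]
    simp [hc]

-- the common target: dedent each '\n'-separated piece and rejoin
def pvTarget (cs : List Char) : List Char :=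
  PySem.Chars.join ['\n'] ((cs.splitOnP (· == '\n')).map pvF)

-- one-step unfoldings of B's loop
theorem altGo_none (acc cur : List Char)
    (h : pvPartitionNL (dedent_selection_altLine cur) = (dedent_selection_altLine cur, none)) :
    dedent_selection_altGo acc cur = acc ++ dedent_selection_altLine cur := by
  rw [dedent_selection_altGo.eq_def]
  split
  · rfl
  · rename_i head tail he
    rw [he] at h
    simp at h

theorem altGo_some (acc cur head tail : List Char)
    (h : pvPartitionNL (dedent_selection_altLine cur) = (head, some tail)) :
    dedent_selection_altGo acc cur = dedent_selection_altGo (acc ++ head ++ ['\n']) tail := by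
  rw [dedent_selection_altGo.eq_def]
  split
  · rename_i fst he
    rw [he] at h
    simp at h
  · rename_i head' tail' he
    rw [he] at h
    simp only [Prod.mk.injEq, Option.some.injEq] at h
    rw [h.1, h.2]

-- B's loop computes pvTarget
theorem altGo_eq_target (n : Nat) : ∀ (cs acc : List Char), cs.length ≤ n →
    dedent_selection_altGo acc cs = acc ++ pvTarget cs := by
  induction n with
  | zero =>
    intro cs acc hlen
    have hnil : cs = [] := List.eq_nil_of_length_eq_zero (Nat.le_zero.mp hlen)
    subst hnil
    have hA : dedent_selection_altLine [] = [] := by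
      simp [dedent_selection_altLine, PySem.Chars.startswith, List.isPrefixOf,
        PySem.List.slice_from _ (le_refl (0:Int))]
    rw [altGo_none acc [] (by rw [hA]; rfl), hA]
    simp only [pvTarget, List.splitOnP_nil, List.map_cons, List.map_nil,
      PySem.Chars.join_singleton, List.append_nil]
    simp [pvF, PySem.Chars.startswith, List.isPrefixOf]
  | succ n ih =>
    intro cs acc hlen
    rcases line_decomp cs with h | ⟨pre, suf, heq, hpre⟩
    · -- no newline: partition finds nothing, loop returns acc ++ pvF cs
      have hrest : '\n' ∉ dedent_selection_altLine cs := by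
        rw [altLine_eq_pvF]; exact fun hm => h (mem_pvF cs hm)
      rw [altGo_none acc cs (pvPartitionNL_of_not_mem _ hrest)]
      rw [altLine_eq_pvF]
      simp only [pvTarget, splitOnP_of_not_mem cs h, List.map_cons, List.map_nil,
        PySem.Chars.join_singleton]
    · -- first newline after pre
      subst heq
      have hF : '\n' ∉ pvF pre := fun hm => hpre (mem_pvF pre hm)
      have hpart : pvPartitionNL (dedent_selection_altLine (pre ++ '\n' :: suf))
          = (pvF pre, some suf) := by
        rw [altLine_eq_pvF, pvF_append_cons pre suf hpre, pvPartitionNL_append_cons _ _ hF]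
      rw [altGo_some acc _ _ _ hpart]
      have hsuf : suf.length ≤ n := by
        have hlen' := hlen
        simp [List.length_append] at hlen'
        omega
      rw [ih suf _ hsuf]
      obtain ⟨p, rest, hres⟩ : ∃ p rest, suf.splitOnP (· == '\n') = p :: rest := by
        cases hres : suf.splitOnP (· == '\n') with
        | nil => exact absurd hres (splitOnP_ne_nil' suf)
        | cons p rest => exact ⟨p, rest, rfl⟩
      simp only [pvTarget, splitOnP_append_cons pre suf hpre, hres, List.map_cons]
      simp [PySem.Chars.join, List.intercalate, List.intersperse]

-- A's splitOn equals List.splitOnP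
theorem splitOn_go_eq (fuel : Nat) : ∀ (l cur : List Char) (acc : List (List Char)), l.length ≤ fuel →
    PySem.Chars.splitOn.go ['\n'] fuel l cur acc
      = acc.reverse ++ (l.splitOnP (· == '\n')).modifyHead (cur.reverse ++ ·) := by
  induction fuel with
  | zero =>
    intro l cur acc hlen
    have : l = [] := List.eq_nil_of_length_eq_zero (Nat.le_zero.mp hlen)
    subst this
    rw [PySem.Chars.splitOn.go.eq_def]
    simp
  | succ fuel ih =>
    intro l cur acc hlen
    cases l with
    | nil =>
      rw [PySem.Chars.splitOn.go.eq_def]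
      simp
    | cons c rest =>
      by_cases hc : c = '\n'
      · subst hc
        rw [show PySem.Chars.splitOn.go ['\n'] (fuel + 1) ('\n' :: rest) cur acc
              = PySem.Chars.splitOn.go ['\n'] fuel rest [] (cur.reverse :: acc) by
            rw [PySem.Chars.splitOn.go.eq_def]; simp [List.isPrefixOf]]
        rw [ih rest [] (cur.reverse :: acc) (by simpa using Nat.le_of_succ_le_succ hlen)]
        rw [List.splitOnP_cons]
        simp only [beq_self_eq_true, if_pos, ite_true, List.reverse_cons, List.modifyHead_cons,
          List.append_assoc, List.singleton_append, List.nil_append]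
        have hid : List.modifyHead (fun x => List.reverse [] ++ x) (rest.splitOnP (· == '\n'))
            = rest.splitOnP (· == '\n') := by
          cases rest.splitOnP (· == '\n') <;> simp [List.modifyHead]
        rw [hid]
        simp
      · rw [show PySem.Chars.splitOn.go ['\n'] (fuel + 1) (c :: rest) cur acc
              = PySem.Chars.splitOn.go ['\n'] fuel rest (c :: cur) acc by
            rw [PySem.Chars.splitOn.go.eq_def]; simp [List.isPrefixOf, Ne.symm hc]]
        rw [ih rest (c :: cur) acc (by simpa using Nat.le_of_succ_le_succ hlen)]
        rw [List.splitOnP_cons]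
        simp only [beq_iff_eq, hc, ite_false, if_neg]
        cases hres : rest.splitOnP (· == '\n') with
        | nil => exact absurd hres (splitOnP_ne_nil' rest)
        | cons p t => simp [List.modifyHead]

theorem splitOn_eq_splitOnP (cs : List Char) :
    PySem.Chars.splitOn cs ['\n'] = cs.splitOnP (· == '\n') := by
  unfold PySem.Chars.splitOn
  rw [splitOn_go_eq (cs.length + 1) cs [] [] (by omega)]
  cases hres : cs.splitOnP (· == '\n') with
  | nil => exact absurd hres (splitOnP_ne_nil' cs)
  | cons p t => simp [List.modifyHead]

-- A computes pvTarget
theorem portA_eq_target (cs : List Char) :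
    (PySem.Chars.splitOn cs ['\n']).foldl (fun acc line =>
      if PySem.Chars.startswith line [' ', ' ', ' ', ' '] then
        acc ++ [PySem.List.slice line (some 4) none]
      else if PySem.Chars.startswith line ['\t'] then
        acc ++ [PySem.List.slice line (some 1) none]
      else
        acc ++ [line]) []
    = (cs.splitOnP (· == '\n')).map pvF := by
  rw [splitOn_eq_splitOnP]
  have hfun : (fun (acc : List (List Char)) line =>
      if PySem.Chars.startswith line [' ', ' ', ' ', ' '] then
        acc ++ [PySem.List.slice line (some 4) none]
      else if PySem.Chars.startswith line ['\t'] then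
        acc ++ [PySem.List.slice line (some 1) none]
      else
        acc ++ [line]) = fun acc line => acc ++ [pvF line] := by
    funext acc line
    unfold pvF
    split_ifs <;> rfl
  rw [hfun, PySem.List.foldl_append_singleton_eq_map]
  simp

-- ===== VERDICT (by name: the statement is the Claim_ definition above) =====
theorem dedent_selection_spec : Claim_equal_dedent_selection := by
  intro code _
  show dedent_selection code = dedent_selection_alt code
  unfold dedent_selection dedent_selection_alt
  simp only []
  rw [portA_eq_target code.toList,
      altGo_eq_target code.toList.length code.toList [] (le_refl _)]
  rfl
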